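-- pv_equiv track=rewrite | github.com/volcengine/verl | atropos/environments/intern_bootcamp/internbootcamp_lib/internbootcamp/bootcamp/ddistinctpaths/ddistinctpaths.py | generate_valid_full_grid
-- ===== SOURCE A (Python) =====
-- def generate_valid_full_grid(n, m, k):
--     grid = [[0 for _ in range(m)] for _ in range(n)]
--     for i in range(n):
--         for j in range(m):
--             used = set()
--             if i > 0:
--                 used.add(grid[i-1][j])
--             if j > 0:
--                 used.add(grid[i][j-1])
--             available = [c for c in range(1, k+1) if c not in used]
--             if not available:
--                 return None
--             grid[i][j] = min(available)
--     return grid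
-- ===== SOURCE B (Python) =====
-- def generate_valid_full_grid(n, m, k):
--     # Closed form: the greedy min-color fill is always a 1/2 checkerboard.
--     if n <= 0:
--         return []
--     if m <= 0:
--         return [[] for _ in range(n)]
--     if k <= 0:
--         return None
--     if k == 1:
--         return [[1]] if n == 1 and m == 1 else None
--     return [[1 + (i + j) % 2 for j in range(m)] for i in range(n)]
-- ===== Notes on version B (the rewrite author's own statement) =====
-- stated objective: simpler
-- what changed: Replaces the per-cell neighbor scan and O(k) available-color search with feasibility guards plus the closed-form checkerboard grid[i][j] = 1 + (i+j) % 2, which the greedy provably always produces.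
import Mathlib
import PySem

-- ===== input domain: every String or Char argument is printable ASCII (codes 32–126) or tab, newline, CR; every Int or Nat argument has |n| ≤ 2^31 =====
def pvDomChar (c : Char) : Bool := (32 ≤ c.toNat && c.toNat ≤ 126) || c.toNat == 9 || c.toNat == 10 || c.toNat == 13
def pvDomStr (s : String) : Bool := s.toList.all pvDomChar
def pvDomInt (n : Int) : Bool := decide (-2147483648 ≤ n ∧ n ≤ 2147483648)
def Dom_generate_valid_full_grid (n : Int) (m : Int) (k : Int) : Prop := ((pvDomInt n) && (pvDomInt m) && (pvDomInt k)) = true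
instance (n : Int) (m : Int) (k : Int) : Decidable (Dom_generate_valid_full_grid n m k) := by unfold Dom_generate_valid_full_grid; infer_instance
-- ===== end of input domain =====

-- B replaces A's per-cell neighbor scan and min-color search by feasibility guards plus the
-- closed-form checkerboard grid[i][j] = 1 + (i+j) % 2 (objective: simpler).

-- ===== PORT A =====
-- One body of A's nested loop: the Python indices grid[i-1][j], grid[i][j-1], grid[i] are
-- always in range when read, so pyGetD's defaults are never read; grid[i][j] = v is the
-- functional update pySetD.
def pvAStep (k : Int) (grid : List (List Int)) (i j : Int) : Option (List (List Int)) :=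
  let used0 : PySem.Set Int := []
  let used1 := if 0 < i then used0.add (PySem.List.pyGetD (PySem.List.pyGetD grid (i - 1) []) j 0) else used0
  let used2 := if 0 < j then used1.add (PySem.List.pyGetD (PySem.List.pyGetD grid i []) (j - 1) 0) else used1
  let available := (PySem.List.pyRange 1 (k + 1)).filter (fun c => !(used2.contains c))
  -- 'if not available: return None' then 'min(available)': min? is none exactly on []
  match PySem.List.min? available id with
  | none => none
  | some v => some (PySem.List.pySetD grid i (PySem.List.pySetD (PySem.List.pyGetD grid i []) j v))

def generate_valid_full_grid (n : Int) (m : Int) (k : Int) : Option (List (List Int)) :=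
  let grid0 := (PySem.List.pyRange 0 n).map (fun _ => (PySem.List.pyRange 0 m).map (fun _ => (0 : Int)))
  (PySem.List.pyRange 0 n).foldlM
    (fun g i => (PySem.List.pyRange 0 m).foldlM (fun g' j => pvAStep k g' i j) g) grid0

-- ===== PORT B =====
def generate_valid_full_grid_alt (n : Int) (m : Int) (k : Int) : Option (List (List Int)) :=
  if n ≤ 0 then some []
  else if m ≤ 0 then some ((PySem.List.pyRange 0 n).map (fun _ => ([] : List Int)))
  else if k ≤ 0 then none
  else if k = 1 then (if n = 1 ∧ m = 1 then some [[1]] else none)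
  else some ((PySem.List.pyRange 0 n).map (fun i =>
    (PySem.List.pyRange 0 m).map (fun j => 1 + PySem.Int.mod (i + j) 2)))

-- ===== PRECONDITION & SPEC =====
def Spec_generate_valid_full_grid (n : Int) (m : Int) (k : Int) (out : Option (List (List Int))) : Prop := out = generate_valid_full_grid_alt n m k
instance (n : Int) (m : Int) (k : Int) (out : Option (List (List Int))) : Decidable (Spec_generate_valid_full_grid n m k out) := by unfold Spec_generate_valid_full_grid; infer_instance

-- ===== CLAIM (what is proved, stated in full; the proofs are below) =====
def Claim_equal_generate_valid_full_grid : Prop := ∀ (n : Int) (m : Int) (k : Int), Dom_generate_valid_full_grid n m k → Spec_generate_valid_full_grid n m k (generate_valid_full_grid n m k)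

-- ===== LEMMAS AND PROOFS =====

-- the empty range
theorem pvRange_nil {a b : Int} (h : b ≤ a) : PySem.List.pyRange a b = [] := by
  simp [PySem.List.pyRange]; intro h2; omega

-- min? of a cons whose head is minimal
theorem pvMin?_cons_of_min (a : Int) (l : List Int) (h : ∀ x ∈ l, ¬ x < a) :
    PySem.List.min? (a :: l) id = some a := by
  have inv : ∀ (f : Option Int → Int → Option Int),
      (∀ (b x : Int), f (some b) x = if x < b then some x else some b) →
      ∀ (l' : List Int) (b : Int), (∀ x ∈ l', ¬ x < b) → List.foldl f (some b) l' = some b := by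
    intro f hf l'
    induction l' with
    | nil => intro b _; rfl
    | cons y t ih =>
      intro b hb
      rw [List.foldl_cons, hf, if_neg (hb y (by simp))]
      exact ih b (fun x hx => hb x (by simp [hx]))
  unfold PySem.List.min?
  rw [List.foldl_cons]
  show List.foldl _ (some a) l = some a
  exact inv _ (fun b x => rfl) l a h

-- setting an element of a mapped range
theorem pvSet_map_range {β : Type} (f : Nat → β) (N r : Nat) (v : β) (hr : r < N) :
    ((List.range N).map f).set r v = (List.range N).map (fun i => if i = r then v else f i) := by
  apply List.ext_getElem
  · simp
  · intro i h1 h2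
    simp only [List.getElem_set, List.getElem_map, List.getElem_range]
    by_cases hi : i = r
    · subst hi; simp
    · rw [if_neg (fun h => hi h.symm), if_neg hi]

-- zero row, checker value, checker row, partially-built row, partially-built grid
def pvZr (M : Nat) : List Int := (List.range M).map (fun _ => (0 : Int))
def pvCv (i j : Nat) : Int := 1 + (((i + j) % 2 : Nat) : Int)
def pvCrow (M i : Nat) : List Int := (List.range M).map (fun j => pvCv i j)
def pvProw (M i j : Nat) : List Int := (List.range M).map (fun t => if t < j then pvCv i t else 0)
def pvPgrid (N M r j : Nat) : List (List Int) :=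
  (List.range N).map (fun i => if i < r then pvCrow M i else if i = r then pvProw M r j else pvZr M)

theorem pvProw_zero (M i : Nat) : pvProw M i 0 = pvZr M := by
  simp [pvProw, pvZr]

theorem pvRow_complete (N M r : Nat) : pvPgrid N M r M = pvPgrid N M (r + 1) 0 := by
  unfold pvPgrid
  apply List.map_congr_left
  intro i _
  rcases lt_trichotomy i r with h | h | h
  · simp [h, Nat.lt_succ_of_lt h]
  · subst h
    simp [pvProw, pvCrow]
    intro a ha ha'
    omega
  · have h1 : ¬ i < r := by omega
    have h2 : i ≠ r := by omega
    by_cases h3 : i = r + 1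
    · simp [h3, pvProw_zero]
    · have : ¬ i < r + 1 := by omega
      simp [h1, h2, h3, this]

-- reading rows and cells of the partial grid
theorem pvPgrid_getD (N M r j i : Nat) (hi : i < N) :
    PySem.List.pyGetD (pvPgrid N M r j) (i : Int) [] =
      (if i < r then pvCrow M i else if i = r then pvProw M r j else pvZr M) := by
  rw [PySem.List.pyGetD_natCast, pvPgrid, PySem.List.getD_map_range _ _ _ _ hi]

theorem pvCrow_getD (M i j : Nat) (hj : j < M) :
    PySem.List.pyGetD (pvCrow M i) (j : Int) 0 = pvCv i j := by
  rw [PySem.List.pyGetD_natCast, pvCrow, PySem.List.getD_map_range _ _ _ _ hj]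

theorem pvProw_getD (M i j t : Nat) (ht : t < M) :
    PySem.List.pyGetD (pvProw M i j) (t : Int) 0 = (if t < j then pvCv i t else 0) := by
  rw [PySem.List.pyGetD_natCast, pvProw, PySem.List.getD_map_range _ _ _ _ ht]

-- minimum of the available colors when color 1 is not used
theorem pvMin_not1 (k : Int) (hk : 1 ≤ k) (u : List Int) (hu : (1 : Int) ∉ u) :
    PySem.List.min? ((PySem.List.pyRange 1 (k + 1)).filter
      (fun c => !(u.contains c))) id = some 1 := by
  rw [PySem.List.pyRange_one_cons (by omega), List.filter_cons,
    if_pos (by simp [hu])]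
  apply pvMin?_cons_of_min
  intro x hx
  have hx2 := PySem.List.mem_pyRange_one.mp (List.mem_of_mem_filter hx)
  omega

-- minimum of the available colors when color 1 is used (needs k ≥ 2)
theorem pvMin_used1 (k : Int) (hk : 2 ≤ k) :
    PySem.List.min? ((PySem.List.pyRange 1 (k + 1)).filter
      (fun c => !(([1] : List Int).contains c))) id = some 2 := by
  rw [PySem.List.pyRange_one_cons (by omega), List.filter_cons,
    if_neg (by simp)]
  rw [show (1 : Int) + 1 = 2 by norm_num, PySem.List.pyRange_one_cons (by omega),
    List.filter_cons, if_pos (by simp)]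
  apply pvMin?_cons_of_min
  intro x hx
  have hx2 := PySem.List.mem_pyRange_one.mp (List.mem_of_mem_filter hx)
  omega

-- no color remains when color 1 is used and k ≤ 1
theorem pvMin_fail (k : Int) (hk : k ≤ 1) :
    PySem.List.min? ((PySem.List.pyRange 1 (k + 1)).filter
      (fun c => !(([1] : List Int).contains c))) id = none := by
  by_cases hk0 : k ≤ 0
  · rw [pvRange_nil (by omega)]; rfl
  · have : k = 1 := by omega
    subst this
    rw [show (1 : Int) + 1 = 2 by norm_num, PySem.List.pyRange_one_cons (by omega),
      pvRange_nil (by omega), List.filter_cons, if_neg (by simp)]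
    rfl

-- writing the greedy color into cell (r, j) extends the partial row by one
theorem pvWrite (N M r j : Nat) (hr : r < N) (hj : j < M) :
    PySem.List.pySetD (pvPgrid N M r j) (r : Int)
      (PySem.List.pySetD (PySem.List.pyGetD (pvPgrid N M r j) (r : Int) []) (j : Int) (pvCv r j)) =
      pvPgrid N M r (j + 1) := by
  rw [pvPgrid_getD N M r j r hr, if_neg (by omega), if_pos rfl]
  rw [PySem.List.pySetD_natCast, PySem.List.pySetD_natCast]
  rw [pvProw, pvSet_map_range _ M j _ hj]
  have hrow : (List.range M).map (fun t => if t = j then pvCv r j else if t < j then pvCv r t else 0) =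
      pvProw M r (j + 1) := by
    apply List.map_congr_left
    intro t _
    by_cases h1 : t = j
    · simp [h1]
    · by_cases h2 : t < j
      · simp [h1, h2, show t < j + 1 by omega]
      · simp [h1, h2, show ¬ t < j + 1 by omega]
  rw [hrow, pvPgrid, pvSet_map_range _ N r _ hr]
  apply List.map_congr_left
  intro i _
  by_cases h1 : i = r
  · simp [h1]
  · by_cases h2 : i < r <;> simp [h1, h2]

-- the one-cell step on the partial grid: succeeds exactly when the needed color exists
theorem pvStep_ok (N M r j : Nat) (k : Int) (hr : r < N) (hj : j < M) (hk1 : 1 ≤ k)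
    (hk : (r + j) % 2 = 0 ∨ 2 ≤ k) :
    pvAStep k (pvPgrid N M r j) (r : Int) (j : Int) = some (pvPgrid N M r (j + 1)) := by
  have hwrite := pvWrite N M r j hr hj
  rcases Nat.eq_zero_or_pos r with hr0 | hr0 <;> rcases Nat.eq_zero_or_pos j with hj0 | hj0
  · -- r = 0, j = 0: no neighbor, color 1
    subst hr0; subst hj0
    simp only [pvAStep, Nat.cast_zero, lt_irrefl, if_false, PySem.Set.contains]
    rw [pvMin_not1 k hk1 [] (by simp)]
    rw [show pvCv 0 0 = (1 : Int) by simp [pvCv]] at hwrite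
    simp only [Nat.cast_zero] at hwrite
    exact congrArg some hwrite
  · -- r = 0, j > 0: left neighbor only
    subst hr0
    have hcast : ((j : Int) - 1) = ((j - 1 : Nat) : Int) := by omega
    have hleft : PySem.List.pyGetD (PySem.List.pyGetD (pvPgrid N M 0 j) ((0 : Nat) : Int) [])
        ((j : Int) - 1) 0 = pvCv 0 (j - 1) := by
      rw [pvPgrid_getD N M 0 j 0 hr, if_neg (by omega), if_pos rfl, hcast,
        pvProw_getD M 0 j (j - 1) (by omega), if_pos (by omega)]
    simp only [pvAStep, Nat.cast_zero, lt_irrefl, if_false,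
      if_pos (show (0 : Int) < (j : Int) by exact_mod_cast hj0)]
    rw [Nat.cast_zero] at hleft
    rw [hleft]
    simp only [PySem.Set.add, PySem.Set.contains, List.contains_nil, Bool.false_eq_true,
      if_false, List.nil_append]
    rcases Nat.mod_two_eq_zero_or_one j with hpar | hpar
    · -- (0+j) % 2 = 0: left neighbor is color 2, take color 1
      rw [show pvCv 0 (j - 1) = 2 by
        unfold pvCv; rw [show (0 + (j - 1)) % 2 = 1 by omega]; norm_num]
      rw [pvMin_not1 k hk1 [2] (by decide)]
      rw [show pvCv 0 j = (1 : Int) by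
        unfold pvCv; rw [show (0 + j) % 2 = 0 by omega]; norm_num] at hwrite
      simp only [Nat.cast_zero] at hwrite
      exact congrArg some hwrite
    · -- (0+j) % 2 = 1: left neighbor is color 1, take color 2 (k ≥ 2)
      have hk2 : 2 ≤ k := by rcases hk with h | h <;> omega
      rw [show pvCv 0 (j - 1) = 1 by
        unfold pvCv; rw [show (0 + (j - 1)) % 2 = 0 by omega]; norm_num]
      rw [pvMin_used1 k hk2]
      rw [show pvCv 0 j = (2 : Int) by
        unfold pvCv; rw [show (0 + j) % 2 = 1 by omega]; norm_num] at hwrite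
      simp only [Nat.cast_zero] at hwrite
      exact congrArg some hwrite
  · -- r > 0, j = 0: top neighbor only
    subst hj0
    have hcast : ((r : Int) - 1) = ((r - 1 : Nat) : Int) := by omega
    have htop : PySem.List.pyGetD (PySem.List.pyGetD (pvPgrid N M r 0) ((r : Int) - 1) [])
        ((0 : Nat) : Int) 0 = pvCv (r - 1) 0 := by
      rw [hcast, pvPgrid_getD N M r 0 (r - 1) (by omega), if_pos (by omega),
        pvCrow_getD M (r - 1) 0 hj]
    simp only [pvAStep, Nat.cast_zero, lt_irrefl, if_false,
      if_pos (show (0 : Int) < (r : Int) by exact_mod_cast hr0)]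
    rw [Nat.cast_zero] at htop
    rw [htop]
    simp only [PySem.Set.add, PySem.Set.contains, List.contains_nil, Bool.false_eq_true,
      if_false, List.nil_append]
    rcases Nat.mod_two_eq_zero_or_one r with hpar | hpar
    · rw [show pvCv (r - 1) 0 = 2 by
        unfold pvCv; rw [show (r - 1 + 0) % 2 = 1 by omega]; norm_num]
      rw [pvMin_not1 k hk1 [2] (by decide)]
      rw [show pvCv r 0 = (1 : Int) by
        unfold pvCv; rw [show (r + 0) % 2 = 0 by omega]; norm_num] at hwrite
      simp only [Nat.cast_zero] at hwrite
      exact congrArg some hwrite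
    · have hk2 : 2 ≤ k := by rcases hk with h | h <;> omega
      rw [show pvCv (r - 1) 0 = 1 by
        unfold pvCv; rw [show (r - 1 + 0) % 2 = 0 by omega]; norm_num]
      rw [pvMin_used1 k hk2]
      rw [show pvCv r 0 = (2 : Int) by
        unfold pvCv; rw [show (r + 0) % 2 = 1 by omega]; norm_num] at hwrite
      simp only [Nat.cast_zero] at hwrite
      exact congrArg some hwrite
  · -- r > 0, j > 0: both neighbors exist and carry the same color
    have hcr : ((r : Int) - 1) = ((r - 1 : Nat) : Int) := by omega
    have hcj : ((j : Int) - 1) = ((j - 1 : Nat) : Int) := by omega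
    have htop : PySem.List.pyGetD (PySem.List.pyGetD (pvPgrid N M r j) ((r : Int) - 1) [])
        (j : Int) 0 = pvCv (r - 1) j := by
      rw [hcr, pvPgrid_getD N M r j (r - 1) (by omega), if_pos (by omega), pvCrow_getD M (r - 1) j hj]
    have hleft : PySem.List.pyGetD (PySem.List.pyGetD (pvPgrid N M r j) (r : Int) [])
        ((j : Int) - 1) 0 = pvCv r (j - 1) := by
      rw [pvPgrid_getD N M r j r hr, if_neg (by omega), if_pos rfl, hcj,
        pvProw_getD M r j (j - 1) (by omega), if_pos (by omega)]
    have heq : pvCv r (j - 1) = pvCv (r - 1) j := by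
      unfold pvCv; rw [show (r + (j - 1)) % 2 = (r - 1 + j) % 2 by omega]
    simp only [pvAStep,
      if_pos (show (0 : Int) < (r : Int) by exact_mod_cast hr0),
      if_pos (show (0 : Int) < (j : Int) by exact_mod_cast hj0)]
    rw [htop, hleft, heq]
    rw [show PySem.Set.add (PySem.Set.add ([] : PySem.Set Int) (pvCv (r - 1) j)) (pvCv (r - 1) j) =
      [pvCv (r - 1) j] from by simp [PySem.Set.add, PySem.Set.contains]]
    simp only [PySem.Set.contains]
    rcases Nat.mod_two_eq_zero_or_one (r + j) with hpar | hpar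
    · rw [show pvCv (r - 1) j = 2 by
        unfold pvCv; rw [show (r - 1 + j) % 2 = 1 by omega]; norm_num]
      rw [pvMin_not1 k hk1 [2] (by decide)]
      rw [show pvCv r j = (1 : Int) by
        unfold pvCv; rw [hpar]; norm_num] at hwrite
      exact congrArg some hwrite
    · have hk2 : 2 ≤ k := by rcases hk with h | h <;> omega
      rw [show pvCv (r - 1) j = 1 by
        unfold pvCv; rw [show (r - 1 + j) % 2 = 0 by omega]; norm_num]
      rw [pvMin_used1 k hk2]
      rw [show pvCv r j = (2 : Int) by
        unfold pvCv; rw [hpar]; norm_num] at hwrite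
      exact congrArg some hwrite

theorem pvStep_fail (N M r j : Nat) (k : Int) (hr : r < N) (hj : j < M)
    (hc : (r + j) % 2 = 1) (hk : k ≤ 1) :
    pvAStep k (pvPgrid N M r j) (r : Int) (j : Int) = none := by
  rcases Nat.eq_zero_or_pos r with hr0 | hr0 <;> rcases Nat.eq_zero_or_pos j with hj0 | hj0
  · omega
  · subst hr0
    have hcast : ((j : Int) - 1) = ((j - 1 : Nat) : Int) := by omega
    have hleft : PySem.List.pyGetD (PySem.List.pyGetD (pvPgrid N M 0 j) ((0 : Nat) : Int) [])
        ((j : Int) - 1) 0 = pvCv 0 (j - 1) := by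
      rw [pvPgrid_getD N M 0 j 0 hr, if_neg (by omega), if_pos rfl, hcast,
        pvProw_getD M 0 j (j - 1) (by omega), if_pos (by omega)]
    simp only [pvAStep, Nat.cast_zero, lt_irrefl, if_false,
      if_pos (show (0 : Int) < (j : Int) by exact_mod_cast hj0)]
    rw [Nat.cast_zero] at hleft
    rw [hleft]
    simp only [PySem.Set.add, PySem.Set.contains, List.contains_nil, Bool.false_eq_true,
      if_false, List.nil_append]
    rw [show pvCv 0 (j - 1) = 1 by
      unfold pvCv; rw [show (0 + (j - 1)) % 2 = 0 by omega]; norm_num]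
    rw [pvMin_fail k hk]
  · subst hj0
    have hcast : ((r : Int) - 1) = ((r - 1 : Nat) : Int) := by omega
    have htop : PySem.List.pyGetD (PySem.List.pyGetD (pvPgrid N M r 0) ((r : Int) - 1) [])
        ((0 : Nat) : Int) 0 = pvCv (r - 1) 0 := by
      rw [hcast, pvPgrid_getD N M r 0 (r - 1) (by omega), if_pos (by omega),
        pvCrow_getD M (r - 1) 0 hj]
    simp only [pvAStep, Nat.cast_zero, lt_irrefl, if_false,
      if_pos (show (0 : Int) < (r : Int) by exact_mod_cast hr0)]
    rw [Nat.cast_zero] at htop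
    rw [htop]
    simp only [PySem.Set.add, PySem.Set.contains, List.contains_nil, Bool.false_eq_true,
      if_false, List.nil_append]
    rw [show pvCv (r - 1) 0 = 1 by
      unfold pvCv; rw [show (r - 1 + 0) % 2 = 0 by omega]; norm_num]
    rw [pvMin_fail k hk]
  · have hcr : ((r : Int) - 1) = ((r - 1 : Nat) : Int) := by omega
    have hcj : ((j : Int) - 1) = ((j - 1 : Nat) : Int) := by omega
    have htop : PySem.List.pyGetD (PySem.List.pyGetD (pvPgrid N M r j) ((r : Int) - 1) [])
        (j : Int) 0 = pvCv (r - 1) j := by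
      rw [hcr, pvPgrid_getD N M r j (r - 1) (by omega), if_pos (by omega), pvCrow_getD M (r - 1) j hj]
    have hleft : PySem.List.pyGetD (PySem.List.pyGetD (pvPgrid N M r j) (r : Int) [])
        ((j : Int) - 1) 0 = pvCv r (j - 1) := by
      rw [pvPgrid_getD N M r j r hr, if_neg (by omega), if_pos rfl, hcj,
        pvProw_getD M r j (j - 1) (by omega), if_pos (by omega)]
    have heq : pvCv r (j - 1) = pvCv (r - 1) j := by
      unfold pvCv; rw [show (r + (j - 1)) % 2 = (r - 1 + j) % 2 by omega]
    simp only [pvAStep,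
      if_pos (show (0 : Int) < (r : Int) by exact_mod_cast hr0),
      if_pos (show (0 : Int) < (j : Int) by exact_mod_cast hj0)]
    rw [htop, hleft, heq]
    rw [show PySem.Set.add (PySem.Set.add ([] : PySem.Set Int) (pvCv (r - 1) j)) (pvCv (r - 1) j) =
      [pvCv (r - 1) j] from by simp [PySem.Set.add, PySem.Set.contains]]
    simp only [PySem.Set.contains]
    rw [show pvCv (r - 1) j = 1 by
      unfold pvCv; rw [show (r - 1 + j) % 2 = 0 by omega]; norm_num]
    rw [pvMin_fail k hk]

theorem pvStep_nocolor (k : Int) (g : List (List Int)) (hk : k ≤ 0) :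
    pvAStep k g 0 0 = none := by
  have : PySem.List.pyRange 1 (k + 1) = [] := pvRange_nil (by omega)
  simp [pvAStep, this, PySem.List.min?]

-- one full row (cells j, j+1, …, j+cnt-1)
theorem pvInner_fold (N M : Nat) (k : Int) (r : Nat) (hr : r < N) (hk1 : 1 ≤ k) :
    ∀ (cnt j : Nat), j + cnt ≤ M →
      (∀ t, j ≤ t → t < j + cnt → (r + t) % 2 = 0 ∨ 2 ≤ k) →
      List.foldlM (fun g jj => pvAStep k g (r : Int) jj) (pvPgrid N M r j)
        ((List.range' j cnt).map (fun t : Nat => (t : Int))) = some (pvPgrid N M r (j + cnt)) := by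
  intro cnt
  induction cnt with
  | zero => intro j _ _; simp
  | succ c ih =>
    intro j hle hc
    rw [List.range'_succ]
    simp only [List.map_cons, List.foldlM_cons]
    rw [pvStep_ok N M r j k hr (by omega) hk1 (hc j (by omega) (by omega))]
    have := ih (j + 1) (by omega) (fun t h1 h2 => hc t (by omega) (by omega))
    simpa [Option.bind_eq_bind, show j + 1 + c = j + (c + 1) by omega] using this

-- all rows r, r+1, …, r+cnt-1 (the k ≥ 2 regime)
theorem pvOuter_fold (N M : Nat) (k : Int) (hk : 2 ≤ k) :
    ∀ (cnt r : Nat), r + cnt ≤ N →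
      List.foldlM (fun g i => (PySem.List.pyRange 0 (M : Int)).foldlM
          (fun g' j => pvAStep k g' i j) g) (pvPgrid N M r 0)
        ((List.range' r cnt).map (fun t : Nat => (t : Int))) = some (pvPgrid N M (r + cnt) 0) := by
  intro cnt
  induction cnt with
  | zero => intro r _; simp
  | succ c ih =>
    intro r hle
    rw [List.range'_succ]
    simp only [List.map_cons, List.foldlM_cons]
    have hrow : (PySem.List.pyRange 0 (M : Int)).foldlM
        (fun g' j => pvAStep k g' (r : Int) j) (pvPgrid N M r 0) = some (pvPgrid N M (r + 1) 0) := by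
      rw [PySem.List.pyRange_zero_natCast, List.range_eq_range']
      have h := pvInner_fold N M k r (by omega) (by omega) M 0 (by omega)
        (fun t _ _ => Or.inr hk)
      rw [Nat.zero_add] at h
      rw [← pvRow_complete N M r]
      exact h
    rw [hrow]
    have := ih (r + 1) (by omega)
    simpa [Option.bind_eq_bind, show r + 1 + c = r + (c + 1) by omega] using this

-- the initial grid of zeros is the empty partial grid
theorem pvInit_grid (N M : Nat) :
    ((PySem.List.pyRange 0 (N : Int)).map (fun _ => (PySem.List.pyRange 0 (M : Int)).map (fun _ => (0 : Int)))) =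
      pvPgrid N M 0 0 := by
  rw [PySem.List.pyRange_zero_natCast, PySem.List.pyRange_zero_natCast]
  simp only [List.map_map, pvPgrid]
  apply List.map_congr_left
  intro i _
  by_cases h : i = 0 <;> simp [h, pvProw_zero, pvZr, Function.comp_def, List.map_const']

-- the finished grid is B's checkerboard
theorem pvFinal_grid (N M : Nat) :
    pvPgrid N M N 0 = (PySem.List.pyRange 0 (N : Int)).map (fun i =>
      (PySem.List.pyRange 0 (M : Int)).map (fun j => 1 + PySem.Int.mod (i + j) 2)) := by
  rw [PySem.List.pyRange_zero_natCast, PySem.List.pyRange_zero_natCast]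
  simp only [List.map_map, pvPgrid]
  apply List.map_congr_left
  intro i hi
  simp only [List.mem_range] at hi
  simp only [Function.comp, hi, if_pos, pvCrow]
  apply List.map_congr_left
  intro j _
  show pvCv i j = 1 + PySem.Int.mod ((i : Int) + (j : Int)) 2
  have : ((i : Int) + (j : Int)) = ((i + j : Nat) : Int) := by push_cast; ring
  rw [this]
  have h2 : ((2 : Nat) : Int) = 2 := by norm_num
  rw [← h2, PySem.Int.mod_natCast]
  rfl

-- fold that does nothing (empty inner row)
theorem pvFoldlM_pure {α β : Type} (l : List α) (g : β) :
    List.foldlM (m := Option) (fun g' _ => pure g') g l = some g := by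
  induction l with
  | nil => rfl
  | cons a t ih => rw [List.foldlM_cons]; exact ih

-- ===== VERDICT (by name: the statement is the Claim_ definition above) =====
theorem generate_valid_full_grid_spec : Claim_equal_generate_valid_full_grid := by
  intro n m k _
  unfold Spec_generate_valid_full_grid
  simp only [generate_valid_full_grid, generate_valid_full_grid_alt]
  by_cases hn : n ≤ 0
  · rw [pvRange_nil hn]
    simp [hn]
  · rw [not_le] at hn
    obtain ⟨N, rfl⟩ := Int.eq_ofNat_of_zero_le (le_of_lt hn)
    have hN : 1 ≤ N := by exact_mod_cast hn
    by_cases hm : m ≤ 0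
    · rw [pvRange_nil hm]
      simp only [List.map_nil, List.foldlM_nil]
      rw [pvFoldlM_pure]
      simp [hm]
    · rw [not_le] at hm
      obtain ⟨M, rfl⟩ := Int.eq_ofNat_of_zero_le (le_of_lt hm)
      have hM : 1 ≤ M := by exact_mod_cast hm
      have hnle : ¬((N : Int) ≤ 0) := by omega
      have hmle : ¬((M : Int) ≤ 0) := by omega
      by_cases hk0 : k ≤ 0
      · have hstep : ∀ g, pvAStep k g 0 0 = none := fun g => pvStep_nocolor k g hk0
        rw [PySem.List.pyRange_one_cons (show (0 : Int) < (N : Int) by omega),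
          PySem.List.pyRange_one_cons (show (0 : Int) < (M : Int) by omega)]
        simp [List.foldlM_cons, hstep, hk0, show N ≠ 0 by omega, show M ≠ 0 by omega]
      · by_cases hk1 : k = 1
        · subst hk1
          by_cases hone : N = 1 ∧ M = 1
          · obtain ⟨rfl, rfl⟩ := hone
            decide
          · rw [pvInit_grid N M]
            by_cases hM2 : 2 ≤ M
            · -- second cell of the first row already fails
              have hs1 : pvAStep 1 (pvPgrid N M 0 0) 0 0 = some (pvPgrid N M 0 1) := by
                have := pvStep_ok N M 0 0 1 (by omega) (by omega) (by omega) (Or.inl (by norm_num))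
                simpa using this
              have hs2 : pvAStep 1 (pvPgrid N M 0 1) 0 1 = none := by
                have := pvStep_fail N M 0 1 1 (by omega) (by omega) (by norm_num) (by omega)
                simpa using this
              obtain ⟨M2, rfl⟩ : ∃ M2, M = M2 + 2 := ⟨M - 2, by omega⟩
              rw [PySem.List.pyRange_one_cons (show (0 : Int) < (N : Int) by omega)]
              rw [PySem.List.pyRange_zero_natCast, List.range_eq_range']
              simp only [List.range'_succ, List.map_cons, List.foldlM_cons,
                Nat.cast_zero]
              rw [hs1]
              simp [hs2, show N ≠ 0 by omega, show ¬((M2:Int) + 2 ≤ 0) by omega, show ¬((M2 : Int) + 2 = 1) by omega]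
            · -- M = 1, N ≥ 2: the first cell of the second row fails
              have hM1 : M = 1 := by omega
              subst hM1
              have hne1 : N ≠ 1 := fun h => hone ⟨h, rfl⟩
              have hN2 : 2 ≤ N := by omega
              have hs1 : pvAStep 1 (pvPgrid N 1 0 0) 0 0 = some (pvPgrid N 1 0 1) := by
                have := pvStep_ok N 1 0 0 1 (by omega) (by omega) (by omega) (Or.inl (by norm_num))
                simpa using this
              have hs2 : pvAStep 1 (pvPgrid N 1 1 0) 1 0 = none := by
                have := pvStep_fail N 1 1 0 1 (by omega) (by omega) (by norm_num) (by omega)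
                simpa using this
              obtain ⟨N2, rfl⟩ : ∃ N2, N = N2 + 2 := ⟨N - 2, by omega⟩
              rw [show ((1 : Nat) : Int) = (1 : Int) by norm_num]
              rw [show PySem.List.pyRange 0 1 = [0] from by decide]
              rw [PySem.List.pyRange_zero_natCast, List.range_eq_range']
              simp only [List.range'_succ, List.map_cons, List.foldlM_cons,
                Nat.cast_zero]
              rw [hs1]
              have hrc : pvPgrid (N2 + 2) 1 0 1 = pvPgrid (N2 + 2) 1 1 0 := pvRow_complete _ _ _
              simp [hrc, hs2, show ¬((N2 : Int) + 2 = 1) by omega, show (0 : Int) < (N2 : Int) + 2 by omega]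
            -- (the two subcases cover ¬(N = 1 ∧ M = 1) since N, M ≥ 1)
        · have hk2 : 2 ≤ k := by omega
          rw [pvInit_grid N M]
          rw [PySem.List.pyRange_zero_natCast N, List.range_eq_range']
          have hfold := pvOuter_fold N M k hk2 N 0 (by omega)
          simp only [Nat.zero_add] at hfold
          rw [hfold, pvFinal_grid]
          simp [hk0, hk1, show N ≠ 0 by omega, show M ≠ 0 by omega,
            PySem.List.pyRange_zero_natCast, List.range_eq_range', Function.comp_def]
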